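-- pv_equiv track=rewrite | github.com/Choi-jujuyeon/Python-CodingTest | 프로그래머스/0/181890. 왼쪽 오른쪽/왼쪽 오른쪽.py | solution
-- ===== SOURCE A (Python) =====
-- def solution(str_list):
--     if 'l' in str_list or 'r'in str_list:
--         for i in str_list:
--             if i=='l':
--                 return str_list[:str_list.index('l')]
--             elif i=='r':
--                 return str_list[str_list.index('r')+1:]
--     else:
--         return []
-- ===== SOURCE B (Python) =====
-- def solution(str_list):
--     acc = []
--     for k, x in enumerate(str_list):
--         if x == 'l':
--             return acc
--         if x == 'r':
--             return str_list[k + 1:]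
--         acc.append(x)
--     return []
-- ===== Notes on version B (the rewrite author's own statement) =====
-- stated objective: simpler
-- what changed: B is a single enumerated pass with a prefix accumulator: it never pre-tests membership and never calls .index; hitting 'l' returns the carried accumulator, hitting 'r' returns the tail after the current position, while A pre-tests membership, scans, and re-scans with .index to slice.
import Mathlib
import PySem

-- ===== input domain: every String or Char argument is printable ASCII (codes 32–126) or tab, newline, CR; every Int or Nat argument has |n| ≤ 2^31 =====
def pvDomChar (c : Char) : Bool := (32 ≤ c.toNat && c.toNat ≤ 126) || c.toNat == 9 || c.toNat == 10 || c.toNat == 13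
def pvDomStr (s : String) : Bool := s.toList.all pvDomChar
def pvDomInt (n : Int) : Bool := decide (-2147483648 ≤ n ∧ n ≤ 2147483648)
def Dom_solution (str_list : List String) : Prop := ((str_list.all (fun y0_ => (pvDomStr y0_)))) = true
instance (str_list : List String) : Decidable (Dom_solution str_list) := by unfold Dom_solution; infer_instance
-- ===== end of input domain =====

-- B replaces A's membership pre-test + scan + per-branch .index re-scan by one enumerated pass
-- carrying the prefix built so far (answer = accumulator at 'l', tail after position k at 'r'); objective: simpler.

-- ===== PORT A =====
-- A's for-loop: scans the remaining suffix, slicing the FULL list at the first 'l'/'r';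
-- returns none when the loop falls through (unreachable under the membership guard).
-- str_list[:i] / str_list[i+1:] with nonnegative i are exactly take / drop.
def solGo (full : List String) : List String → Option (List String)
  | [] => none
  | i :: rest =>
    if i = "l" then some (full.take ((PySem.List.index? full "l").getD 0))
    else if i = "r" then some (full.drop (((PySem.List.index? full "r").getD 0) + 1))
    else solGo full rest

def solution (str_list : List String) : List String :=
  if "l" ∈ str_list ∨ "r" ∈ str_list then (solGo str_list str_list).getD []
  else []

-- ===== PORT B =====
-- Source B's for-loop over enumerate: 'l' returns the accumulator, 'r' returns str_list[k+1:], else append.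
def altGo (full : List String) (acc : List String) : List (Int × String) → List String
  | [] => []
  | (k, x) :: rest =>
    if x = "l" then acc
    else if x = "r" then PySem.List.slice full (some (k + 1)) none
    else altGo full (acc ++ [x]) rest

def solution_alt (str_list : List String) : List String :=
  altGo str_list [] (PySem.List.enumerate str_list 0)

-- ===== PRECONDITION & SPEC =====
def Spec_solution (str_list : List String) (out : List String) : Prop := out = solution_alt str_list
instance (str_list : List String) (out : List String) : Decidable (Spec_solution str_list out) := by unfold Spec_solution; infer_instance

-- ===== CLAIM (what is proved, stated in full; the proofs are below) =====
def Claim_equal_solution : Prop := ∀ (str_list : List String), Dom_solution str_list → Spec_solution str_list (solution str_list)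

-- ===== LEMMAS AND PROOFS =====

-- first occurrence of v in pre ++ v :: suf, when v ∉ pre, is at pre.length
theorem idx_first (v : String) (pre suf : List String) (h : v ∉ pre) :
    PySem.List.index? (pre ++ v :: suf) v = some pre.length := by
  rw [PySem.List.index?_eq_some_iff]
  exact ⟨pre, suf, rfl, rfl, h⟩

-- A's scan skips a marker-free prefix of its second argument
theorem solGo_skip (full p l : List String) (hl : "l" ∉ p) (hr : "r" ∉ p) :
    solGo full (p ++ l) = solGo full l := by
  induction p with
  | nil => rfl
  | cons x xs ih =>
    have hxl : x ≠ "l" := fun h => hl (h ▸ List.mem_cons_self ..)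
    have hxr : x ≠ "r" := fun h => hr (h ▸ List.mem_cons_self ..)
    show solGo full (x :: (xs ++ l)) = _
    rw [solGo, if_neg hxl, if_neg hxr,
        ih (fun h => hl (List.mem_cons_of_mem _ h)) (fun h => hr (List.mem_cons_of_mem _ h))]

theorem altGo_eq_solution : ∀ (l pre : List String), "l" ∉ pre → "r" ∉ pre →
    altGo (pre ++ l) pre (PySem.List.enumerate l (pre.length : Int)) = solution (pre ++ l) := by
  intro l
  induction l with
  | nil =>
    intro pre hl hr
    unfold solution
    rw [if_neg (by simpa using not_or.mpr ⟨hl, hr⟩), PySem.List.enumerate_nil]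
    rfl
  | cons x rest ih =>
    intro pre hl hr
    by_cases hxl : x = "l"
    · subst hxl
      rw [PySem.List.enumerate_cons, altGo, if_pos rfl]
      unfold solution
      rw [if_pos (Or.inl (by simp)),
          solGo_skip (pre ++ "l" :: rest) pre ("l" :: rest) hl hr,
          solGo, if_pos rfl, idx_first "l" pre rest hl]
      simp
    · by_cases hxr : x = "r"
      · subst hxr
        rw [PySem.List.enumerate_cons, altGo, if_neg (by decide), if_pos rfl]
        unfold solution
        rw [if_pos (Or.inr (by simp)),
            solGo_skip (pre ++ "r" :: rest) pre ("r" :: rest) hl hr,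
            solGo, if_neg (by decide : ¬ ("r" : String) = "l"), if_pos rfl,
            idx_first "r" pre rest hr,
            PySem.List.slice_from _ (by positivity)]
        simp
      · rw [PySem.List.enumerate_cons, altGo, if_neg hxl, if_neg hxr]
        have hl' : "l" ∉ pre ++ [x] := by
          simp [hl]; exact fun h => hxl h.symm
        have hr' : "r" ∉ pre ++ [x] := by
          simp [hr]; exact fun h => hxr h.symm
        have hlen : ((pre.length : Int) + 1) = (((pre ++ [x]).length : Nat) : Int) := by
          simp
        have := ih (pre ++ [x]) hl' hr'
        rw [List.append_assoc, List.singleton_append] at this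
        rw [hlen, this]

-- ===== VERDICT (by name: the statement is the Claim_ definition above) =====
theorem solution_spec : Claim_equal_solution := by
  intro str_list _
  unfold Spec_solution solution_alt
  have := altGo_eq_solution str_list [] (by simp) (by simp)
  simp only [List.nil_append, List.length_nil, Nat.cast_zero] at this
  rw [this]
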